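-- pv_equiv track=rewrite | github.com/EugenTheMachine/NLP-1 | Module_2_Classification/src/data_extractor.py | ranking_labels
-- ===== SOURCE A (Python) =====
-- def ranking_labels(doc_labels: list) -> list[int]:
--     """Marks label changes in the list
--        [a, a, b, c] -> [0, 0, 1, 2]
--
--     Args:
--         doc_labels (list[str]): list of labels
--
--     Returns:
--         list[int]: list with labels 'ranks'
--     """
--     rank = []
--     label_change_counter = 0
--     for n in range(len(doc_labels)):
--         if n != 0:
--             if doc_labels[n - 1] != doc_labels[n]:
--                 label_change_counter += 1
--         rank.append(label_change_counter)
--     return rank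
-- ===== SOURCE B (Python) =====
-- def ranking_labels(doc_labels: list) -> list[int]:
--     """Run-length scan: locate each maximal run of equal labels with an inner
--     while loop, emit its rank replicated over the whole run, advance past it."""
--     out = []
--     r = 0
--     i = 0
--     n = len(doc_labels)
--     while i < n:
--         j = i + 1
--         while j < n and doc_labels[j] == doc_labels[i]:
--             j += 1
--         out.extend([r] * (j - i))
--         r += 1
--         i = j
--     return out
-- ===== Notes on version B (the rewrite author's own statement) =====
-- stated objective: alternative
-- what changed: Replaces A's per-element counter loop (one comparison and one append per index) with a run-length scan: an inner while loop finds each maximal run of equal labels, the run's rank is emitted replicated over the run's length, and the outer loop advances directly past the run.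
import Mathlib
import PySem

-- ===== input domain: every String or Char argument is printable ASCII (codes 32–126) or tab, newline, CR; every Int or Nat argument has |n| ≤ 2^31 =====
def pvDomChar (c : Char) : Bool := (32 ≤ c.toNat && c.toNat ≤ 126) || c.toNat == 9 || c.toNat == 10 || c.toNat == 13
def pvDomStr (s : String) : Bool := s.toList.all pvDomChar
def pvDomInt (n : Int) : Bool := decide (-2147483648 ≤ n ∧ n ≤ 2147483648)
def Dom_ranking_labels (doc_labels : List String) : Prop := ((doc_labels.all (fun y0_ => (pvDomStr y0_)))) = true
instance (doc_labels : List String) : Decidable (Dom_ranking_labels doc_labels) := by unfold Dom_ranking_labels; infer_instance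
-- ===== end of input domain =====

-- B replaces A's per-element counter loop with a run-length scan (inner while
-- finds each maximal run, its rank is emitted replicated); same cost, alternative structure.

-- ===== PORT A =====
-- literal port of A: for n in range(len(doc_labels)): nested if, counter, append
def ranking_labels (doc_labels : List String) : List Int :=
  ((PySem.List.pyRange 0 doc_labels.length 1).foldl
    (fun (st : List Int × Int) n =>
      let cnt := if n ≠ 0 then
          (if PySem.List.pyGet? doc_labels (n - 1) ≠ PySem.List.pyGet? doc_labels n
           then st.2 + 1 else st.2)
        else st.2
      (st.1 ++ [cnt], cnt)) ([], 0)).1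

-- ===== PORT B =====
-- port of Source B's outer while loop; the indices i, j are rendered as the suffix
-- doc_labels[i:] and the inner while's count j-i-1 of further equal labels
-- (a takeWhile length); out, r are the loop state.
def rl_go : List String → Int → List Int → List Int
  | [], _, out => out
  | x :: tl, r, out =>
    let m := (tl.takeWhile (· == x)).length
    rl_go (tl.drop m) (r + 1) (out ++ List.replicate (m + 1) r)
termination_by l _ _ => l.length
decreasing_by simp [List.length_drop]

def ranking_labels_alt (doc_labels : List String) : List Int :=
  rl_go doc_labels 0 []

-- ===== PRECONDITION & SPEC =====
def Spec_ranking_labels (doc_labels : List String) (out : List Int) : Prop := out = ranking_labels_alt doc_labels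
instance (doc_labels : List String) (out : List Int) : Decidable (Spec_ranking_labels doc_labels out) := by unfold Spec_ranking_labels; infer_instance

-- ===== CLAIM (what is proved, stated in full; the proofs are below) =====
def Claim_equal_ranking_labels : Prop := ∀ (doc_labels : List String), Dom_ranking_labels doc_labels → Spec_ranking_labels doc_labels (ranking_labels doc_labels)

-- ===== LEMMAS AND PROOFS =====

-- the per-index change indicator that A's loop body adds to its counter
def pvChange (xs : List String) (n : Int) : Int :=
  if n ≠ 0 ∧ PySem.List.pyGet? xs (n - 1) ≠ PySem.List.pyGet? xs n then 1 else 0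

-- prefix-sum spec both ports are reduced to
def psum : List Int → Int → List Int
  | [], _ => []
  | c :: cs, t => (t + c) :: psum cs (t + c)

-- A's loop body is a prefix-sum body applied to the indicator
theorem pvBodyEq (xs : List String) :
    (fun (st : List Int × Int) n =>
      let cnt := if n ≠ 0 then
          (if PySem.List.pyGet? xs (n - 1) ≠ PySem.List.pyGet? xs n
           then st.2 + 1 else st.2)
        else st.2
      (st.1 ++ [cnt], cnt))
    = fun st n => (st.1 ++ [st.2 + pvChange xs n], st.2 + pvChange xs n) := by
  funext st n
  simp only [pvChange]
  by_cases h0 : n = 0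
  · simp [h0]
  · by_cases hc : PySem.List.pyGet? xs (n - 1) ≠ PySem.List.pyGet? xs n <;> simp [h0, hc]

-- the indicators over range(len(xs)) are the adjacent-change list
theorem pvChangesEq (x : String) (tl : List String) :
    (PySem.List.pyRange 0 ((x :: tl).length) 1).map (pvChange (x :: tl))
    = 0 :: ((x :: tl).zip tl).map (fun p => if p.1 ≠ p.2 then (1 : Int) else 0) := by
  rw [PySem.List.pyRange_one]
  apply List.ext_getElem
  · simp [List.length_zip]
  · intro i h1 h2
    simp only [List.getElem_map]
    cases i with
    | zero => simp [pvChange]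
    | succ k =>
      have hk : k < tl.length := by
        simpa [List.length_zip] using h2
      simp only [List.getElem_cons_succ, List.getElem_map, List.getElem_zip]
      simp only [List.length_cons, List.getElem_range]
      have h1' : ((0 : Int) + ((k + 1 : Nat) : Int)) = ((k : Int) + 1) := by push_cast; ring
      simp only [pvChange, h1', add_sub_cancel_right]
      have ha : PySem.List.pyGet? (x :: tl) ((k : Int)) = (x :: tl)[k]? :=
        PySem.List.pyGet?_natCast _ _
      have hb : PySem.List.pyGet? (x :: tl) ((k : Int) + 1) = (x :: tl)[k + 1]? := by
        rw [show ((k : Int) + 1) = ((k + 1 : Nat) : Int) by push_cast; ring]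
        exact PySem.List.pyGet?_natCast _ _
      rw [ha, hb]
      have hg1 : (x :: tl)[k]? = some ((x :: tl)[k]'(by simp; omega)) := List.getElem?_eq_getElem _
      have hg2 : (x :: tl)[k + 1]? = some (tl[k]'hk) := by
        rw [List.getElem?_eq_getElem (by simp; omega)]
        simp
      rw [hg1, hg2]
      by_cases he : (x :: tl)[k]'(by simp; omega) = tl[k]'hk <;> simp [he]
      omega

-- A's append-accumulating fold is psum
theorem foldl_psum (l : List Int) : ∀ (acc : List Int) (t : Int),
    (l.foldl (fun (st : List Int × Int) c => (st.1 ++ [st.2 + c], st.2 + c)) (acc, t)).1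
    = acc ++ psum l t := by
  induction l with
  | nil => intro acc t; simp [psum]
  | cons c cs ih => intro acc t; simp [psum, ih]

-- B's run-length scan is psum of the adjacent-change list
theorem rl_go_eq (ys : List String) : ∀ (y : String) (r : Int) (out : List Int),
    rl_go (y :: ys) r out
    = out ++ r :: psum (((y :: ys).zip ys).map (fun p => if p.1 ≠ p.2 then (1 : Int) else 0)) r := by
  induction ys with
  | nil =>
    intro y r out
    rw [rl_go]
    simp only [List.takeWhile_nil, List.length_nil, List.drop_nil]
    rw [rl_go]
    simp [psum]
  | cons z zs ih =>
    intro y r out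
    by_cases hzy : z = y
    · subst hzy
      have step : rl_go (z :: z :: zs) r out = rl_go (z :: zs) r (out ++ [r]) := by
        conv_lhs => rw [rl_go]
        conv_rhs => rw [rl_go]
        simp [List.takeWhile, List.replicate_succ, List.append_assoc]
      rw [step, ih]
      simp [psum]
    · have hzy' : (z == y) = false := by simp [hzy]
      have step : rl_go (y :: z :: zs) r out = rl_go (z :: zs) (r + 1) (out ++ [r]) := by
        rw [rl_go]
        simp [List.takeWhile, hzy']
      rw [step, ih]
      simp [psum, Ne.symm hzy]

-- ===== VERDICT (by name: the statement is the Claim_ definition above) =====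
theorem ranking_labels_spec : Claim_equal_ranking_labels := by
  intro doc_labels _
  unfold Spec_ranking_labels ranking_labels ranking_labels_alt
  cases doc_labels with
  | nil => rw [rl_go]; simp [PySem.List.pyRange]
  | cons x tl =>
    rw [pvBodyEq (x :: tl)]
    have h2 : (PySem.List.pyRange 0 ((x :: tl).length) 1).foldl
        (fun (st : List Int × Int) n =>
          (st.1 ++ [st.2 + pvChange (x :: tl) n], st.2 + pvChange (x :: tl) n)) ([], 0)
      = (0 :: ((x :: tl).zip tl).map (fun p => if p.1 ≠ p.2 then (1 : Int) else 0)).foldl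
        (fun (st : List Int × Int) c => (st.1 ++ [st.2 + c], st.2 + c)) ([], 0) := by
      rw [← pvChangesEq x tl, List.foldl_map]
    rw [h2, foldl_psum, rl_go_eq]
    simp [psum]
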